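-- pv_equiv track=rewrite | github.com/devwithpug/Algorithm_Study | python/Programmers/월간_코드_챌린지_시즌3/answer2.py | solution
-- ===== SOURCE A (Python) =====
-- def solution(n, left, right):
--     arr = []
--
--     for i in range(left, right+1):
--         if i+1 < n:
--             arr.append(i+1)
--         elif (i+1) % n == 0:
--             arr.append(n)
--         elif (i+1)%n <= i//n:
--             arr.append(i//n+1)
--         else:
--             arr.append((i+1)%n)
--     return arr
-- ===== SOURCE B (Python) =====
-- def solution(n, left, right):
--     # Build the needed full rows of the matrix, then slice the flat window out.
--     # Row r of the matrix is r+1 repeated r+1 times followed by r+2..n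
--     # (cell (r,c) holds max(r,c)+1).
--     if right < left:
--         return []
--     rows = []
--     for r in range(left // n, right // n + 1):
--         rows += [r + 1] * min(r + 1, n) + list(range(r + 2, n + 1))
--     return rows[left % n : left % n + right - left + 1]
-- ===== Notes on version B (the rewrite author's own statement) =====
-- stated objective: alternative
-- what changed: Instead of computing each element with A's per-index four-way branch cascade, B builds the needed full matrix rows (each row r is r+1 repeated r+1 times followed by r+2..n, built by list repetition and range) and slices the flat window [left%n : left%n+right-left+1] out of their concatenation; Pre_ excludes n<=0 (ZeroDivisionError for nonempty ranges) and ranges reaching indices outside the n x n matrix (negative, or i>=n*n with i%n==n-1), where A's cascade values are accidental.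
-- outside the precondition, e.g. on solution(3, 11, 11): A returns [3], B returns [4]; on solution(3, -5, -5): A returns [-4], B returns [1]
import Mathlib
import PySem

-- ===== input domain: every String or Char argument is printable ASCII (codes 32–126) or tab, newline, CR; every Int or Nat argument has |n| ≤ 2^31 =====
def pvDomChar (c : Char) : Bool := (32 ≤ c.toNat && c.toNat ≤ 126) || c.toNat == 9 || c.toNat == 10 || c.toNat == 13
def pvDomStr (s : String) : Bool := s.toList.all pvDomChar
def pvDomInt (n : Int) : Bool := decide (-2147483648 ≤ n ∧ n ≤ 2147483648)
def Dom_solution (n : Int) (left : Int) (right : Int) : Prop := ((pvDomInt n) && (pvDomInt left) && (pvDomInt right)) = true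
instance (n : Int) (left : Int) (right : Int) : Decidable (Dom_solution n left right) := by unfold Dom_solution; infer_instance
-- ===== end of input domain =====

-- B builds the needed full matrix rows (row r = r+1 repeated, then r+2..n) and slices
-- the flat window out of their concatenation, instead of A's per-index branch cascade.

-- ===== PORT A =====
def solution (n : Int) (left : Int) (right : Int) : List Int :=
  (PySem.List.pyRange left (right + 1) 1).foldl (fun arr i =>
    if i + 1 < n then arr ++ [i + 1]
    else if PySem.Int.mod (i + 1) n = 0 then arr ++ [n]
    else if PySem.Int.mod (i + 1) n ≤ PySem.Int.floordiv i n then arr ++ [PySem.Int.floordiv i n + 1]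
    else arr ++ [PySem.Int.mod (i + 1) n]) []

-- ===== PORT B =====
def solution_alt (n : Int) (left : Int) (right : Int) : List Int :=
  if right < left then []
  else
    let rows := (PySem.List.pyRange (PySem.Int.floordiv left n) (PySem.Int.floordiv right n + 1) 1).foldl
      (fun rows r =>
        rows ++ (PySem.List.pyRepeat [r + 1] (if r + 1 ≤ n then r + 1 else n) ++ PySem.List.pyRange (r + 2) (n + 1) 1)) []
    PySem.List.slice rows (some (PySem.Int.mod left n))
      (some (PySem.Int.mod left n + right - left + 1))

-- ===== PRECONDITION & SPEC =====
-- first index ≥ left of the form i ≥ n² with i % n = n - 1 (the indices outside the n×n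
-- matrix on which A's cascade returns the accidental value n)
def pvFirstBad (n : Int) (left : Int) : Int :=
  if left ≤ n * n + n - 1 then n * n + n - 1 else left + (n - 1 - left) % n

-- Pre_ admits every empty range, and otherwise excludes n ≤ 0 (n = 0 raises ZeroDivisionError)
-- and ranges containing a negative flat index or an index i ≥ n² with i % n = n - 1: such
-- indices lie outside the n×n matrix the problem is about, and there A's branch values are
-- accidents of its cascade.
def Pre_solution (n : Int) (left : Int) (right : Int) : Prop :=
  right < left ∨ (1 ≤ n ∧ 0 ≤ left ∧ right < pvFirstBad n left)
instance (n : Int) (left : Int) (right : Int) : Decidable (Pre_solution n left right) := by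
  unfold Pre_solution; infer_instance

def pvWitness_solution : Int × Int × Int := (3, 2, 5)

def Spec_solution (n : Int) (left : Int) (right : Int) (out : List Int) : Prop :=
  out = solution_alt n left right
instance (n : Int) (left : Int) (right : Int) (out : List Int) : Decidable (Spec_solution n left right out) := by
  unfold Spec_solution; infer_instance

-- ===== CLAIM (what is proved, stated in full; the proofs are below) =====
def Claim_equal_solution : Prop := ∀ (n : Int) (left : Int) (right : Int),
  Dom_solution n left right → Pre_solution n left right →
  Spec_solution n left right (solution n left right)

-- ===== LEMMAS AND PROOFS =====

-- A's per-element branch cascade, as a function of i.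
def cellA (n i : Int) : Int :=
  if i + 1 < n then i + 1
  else if PySem.Int.mod (i + 1) n = 0 then n
  else if PySem.Int.mod (i + 1) n ≤ PySem.Int.floordiv i n then PySem.Int.floordiv i n + 1
  else PySem.Int.mod (i + 1) n

-- the intended matrix cell value at flat index i
def pvMaxf (n i : Int) : Int :=
  max (PySem.Int.floordiv i n) (PySem.Int.mod i n) + 1

theorem solution_eq_map (n left right : Int) :
    solution n left right = (PySem.List.pyRange left (right + 1) 1).map (cellA n) := by
  unfold solution
  have hbody : (fun (arr : List Int) (i : Int) =>
      if i + 1 < n then arr ++ [i + 1]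
      else if PySem.Int.mod (i + 1) n = 0 then arr ++ [n]
      else if PySem.Int.mod (i + 1) n ≤ PySem.Int.floordiv i n then arr ++ [PySem.Int.floordiv i n + 1]
      else arr ++ [PySem.Int.mod (i + 1) n])
      = fun arr i => arr ++ [cellA n i] := by
    funext arr i
    unfold cellA
    split_ifs <;> rfl
  rw [hbody, PySem.List.foldl_append_singleton_eq_map]
  simp

theorem cellA_eq_max (n i : Int) (hn : 1 ≤ n) (h0 : 0 ≤ i)
    (hi : i % n = n - 1 → i < n * n) :
    cellA n i = pvMaxf n i := by
  have hpos : (0 : Int) < n := hn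
  unfold cellA pvMaxf
  rw [PySem.Int.floordiv_eq_ediv_of_pos hpos, PySem.Int.mod_eq_emod_of_pos hpos,
      PySem.Int.mod_eq_emod_of_pos hpos]
  have hkey : n * (i / n) + i % n = i := Int.ediv_add_emod i n
  have hr0 : 0 ≤ i % n := Int.emod_nonneg i (by omega)
  have hrn : i % n < n := Int.emod_lt_of_pos i hpos
  have hq0 : 0 ≤ i / n := Int.ediv_nonneg h0 (le_of_lt hpos)
  have hmod1 : (i + 1) % n = (i % n + 1) % n := by
    have h' : i + 1 = (i % n + 1) + n * (i / n) := by linarith [hkey]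
    rw [h', Int.add_mul_emod_self_left]
  by_cases hb1 : i + 1 < n
  · have hq : i / n = 0 := Int.ediv_eq_zero_of_lt h0 (by omega)
    have hr : i % n = i := Int.emod_eq_of_lt h0 (by omega)
    rw [if_pos hb1, hq, hr, max_eq_right h0]
  · rw [if_neg hb1]
    by_cases hrtop : i % n = n - 1
    · have hz : (i + 1) % n = 0 := by
        rw [hmod1, hrtop]
        simp
      have hlt : i < n * n := hi hrtop
      have hqn : i / n < n := by rw [Int.ediv_lt_iff_lt_mul hpos]; exact hlt
      rw [if_pos hz, hrtop, max_eq_right (by omega : i / n ≤ n - 1)]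
      omega
    · have hv : (i + 1) % n = i % n + 1 := by
        rw [hmod1]
        exact Int.emod_eq_of_lt (by omega) (by omega)
      have hz : ¬ (i + 1) % n = 0 := by omega
      rw [if_neg hz, hv]
      by_cases hc : i % n + 1 ≤ i / n
      · rw [if_pos hc, max_eq_left (by omega : i % n ≤ i / n)]
      · rw [if_neg hc, max_eq_right (by omega : i / n ≤ i % n)]

theorem maxf_cell (n r k : Int) (hn : 1 ≤ n) (_hr : 0 ≤ r) (hk0 : 0 ≤ k) (hkn : k < n) :
    pvMaxf n (r * n + k) = max r k + 1 := by
  have hpos : (0 : Int) < n := hn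
  unfold pvMaxf
  rw [PySem.Int.floordiv_eq_ediv_of_pos hpos, PySem.Int.mod_eq_emod_of_pos hpos]
  have h1 : r * n + k = k + n * r := by ring
  have hdiv : (r * n + k) / n = r := by
    rw [h1, Int.add_mul_ediv_left _ _ (by omega : n ≠ 0),
        Int.ediv_eq_zero_of_lt hk0 hkn]
    ring
  have hmod : (r * n + k) % n = k := by
    rw [h1, Int.add_mul_emod_self_left, Int.emod_eq_of_lt hk0 hkn]
  rw [hdiv, hmod]

-- one matrix row, as built by B, equals the pvMaxf values of its flat indices
theorem row_eq (n r : Int) (hn : 1 ≤ n) (hr : 0 ≤ r) :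
    PySem.List.pyRepeat [r + 1] (if r + 1 ≤ n then r + 1 else n) ++ PySem.List.pyRange (r + 2) (n + 1) 1
      = (PySem.List.pyRange (r * n) (r * n + n) 1).map (pvMaxf n) := by
  rw [show (if r + 1 ≤ n then r + 1 else n) = min (r + 1) n from (min_def _ _).symm]
  rw [PySem.List.pyRepeat_singleton, PySem.List.pyRange_one, PySem.List.pyRange_one]
  simp only [List.map_map]
  have hlen1 : (min (r + 1) n).toNat + (n + 1 - (r + 2)).toNat = (r * n + n - r * n).toNat := by
    rcases le_or_gt (r + 1) n with h | h
    · rw [min_eq_left h]; omega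
    · rw [min_eq_right (by omega : n ≤ r + 1)]; omega
  apply List.ext_getElem
  · simp [hlen1]
  · intro j h1 h2
    simp only [List.length_append, List.length_replicate, List.length_map,
      List.length_range] at h1 h2
    have hjlt : (j : Int) < n := by omega
    rcases lt_or_ge j (min (r + 1) n).toNat with hj | hj
    · rw [List.getElem_append_left (by simpa using hj)]
      simp only [List.getElem_replicate, List.getElem_map, List.getElem_range,
        Function.comp_apply]
      rw [maxf_cell n r j hn hr (by positivity) hjlt]
      have : (j : Int) ≤ r := by
        rcases le_or_gt (r + 1) n with h | h
        · rw [min_eq_left h] at hj; exact_mod_cast by omega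
        · rw [min_eq_right (by omega : n ≤ r + 1)] at hj; omega
      omega
    · rw [List.getElem_append_right (by simpa using hj)]
      simp only [List.getElem_map, List.getElem_range, Function.comp_apply,
        List.length_replicate]
      rw [maxf_cell n r j hn hr (by positivity) hjlt]
      have hmin : min (r + 1) n = r + 1 := by
        rcases le_or_gt (r + 1) n with h | h
        · exact min_eq_left h
        · exfalso
          rw [min_eq_right (by omega : n ≤ r + 1)] at hj
          omega
      rw [hmin] at hj ⊢
      have hjr : r + 1 ≤ (j : Int) := by omega
      have : r + 2 + ((j : Int) - (r + 1).toNat) = (j : Int) + 1 := by omega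
      omega

-- the concatenation of rows rl .. rl+m-1 equals the pvMaxf values of flat indices rl*n .. (rl+m)*n-1
theorem rows_eq (n rl : Int) (hn : 1 ≤ n) (hrl : 0 ≤ rl) : ∀ m : Nat,
    (PySem.List.pyRange rl (rl + m) 1).foldl
      (fun rows r =>
        rows ++ (PySem.List.pyRepeat [r + 1] (if r + 1 ≤ n then r + 1 else n) ++ PySem.List.pyRange (r + 2) (n + 1) 1)) []
      = (PySem.List.pyRange (rl * n) ((rl + m) * n) 1).map (pvMaxf n) := by
  intro m
  induction m with
  | zero =>
    rw [PySem.List.pyRange_one_eq_nil (by omega), PySem.List.pyRange_one_eq_nil (by norm_num)]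
    rfl
  | succ m ih =>
    have h1 : rl + (m + 1 : Nat) = (rl + m) + 1 := by push_cast; ring
    rw [h1, PySem.List.pyRange_one_succ_right (by omega), List.foldl_append, ih]
    have h2 : ((rl + m) + 1) * n = (rl + m) * n + n := by ring
    rw [h2, PySem.List.pyRange_one_append (rl * n) ((rl + m) * n) ((rl + m) * n + n)
      (by nlinarith [Int.natCast_nonneg m]) (by omega), List.map_append]
    simp only [List.foldl_cons, List.foldl_nil]
    rw [row_eq n (rl + m) hn (by positivity)]

-- ===== VERDICT (by name: the statement is the Claim_ definition above) =====
theorem solution_spec : Claim_equal_solution := by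
  intro n left right _hdom hpre
  unfold Spec_solution
  rw [solution_eq_map]
  by_cases hlt : right < left
  · rw [PySem.List.pyRange_one_eq_nil (by omega)]
    unfold solution_alt
    rw [if_pos hlt]
    rfl
  · push_neg at hlt
    rcases hpre with hempty | ⟨hn, hl, hr⟩
    · omega
    · have hpos : (0 : Int) < n := hn
      unfold solution_alt
      rw [if_neg (by omega)]
      rw [PySem.Int.floordiv_eq_ediv_of_pos hpos, PySem.Int.floordiv_eq_ediv_of_pos hpos,
          PySem.Int.mod_eq_emod_of_pos hpos]
      set rl := left / n with hrl_def
      set rr := right / n with hrr_def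
      have hrl0 : 0 ≤ rl := Int.ediv_nonneg hl (le_of_lt hpos)
      have hrlrr : rl ≤ rr := Int.ediv_le_ediv hpos hlt
      have hm : ∃ m : Nat, rr + 1 = rl + m := ⟨(rr + 1 - rl).toNat, by omega⟩
      obtain ⟨m, hmval⟩ := hm
      rw [hmval, rows_eq n rl hn hrl0 m, ← hmval]
      -- now the slice of the mapped big range
      have hlmod : left % n = left - rl * n := by
        have h := Int.ediv_add_emod left n
        rw [← hrl_def] at h
        linarith [mul_comm rl n]
      have hrmod : right % n = right - rr * n := by
        have h := Int.ediv_add_emod right n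
        rw [← hrr_def] at h
        linarith [mul_comm rr n]
      have hmod0 : 0 ≤ left % n := Int.emod_nonneg left (by omega)
      have hmodn : left % n < n := Int.emod_lt_of_pos left hpos
      have hrmod0 : 0 ≤ right % n := Int.emod_nonneg right (by omega)
      have hrmodn : right % n < n := Int.emod_lt_of_pos right hpos
      -- split the big range at left and at right+1
      have hsplit1 : PySem.List.pyRange (rl * n) ((rr + 1) * n) 1
          = PySem.List.pyRange (rl * n) left 1 ++ PySem.List.pyRange left ((rr + 1) * n) 1 :=
        PySem.List.pyRange_one_append _ _ _ (by omega) (by nlinarith)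
      have hsplit2 : PySem.List.pyRange left ((rr + 1) * n) 1
          = PySem.List.pyRange left (right + 1) 1 ++ PySem.List.pyRange (right + 1) ((rr + 1) * n) 1 :=
        PySem.List.pyRange_one_append _ _ _ (by omega) (by nlinarith)
      rw [hsplit1, hsplit2, List.map_append, List.map_append]
      have ha : (left % n).toNat = ((PySem.List.pyRange (rl * n) left 1).map (pvMaxf n)).length := by
        rw [List.length_map, PySem.List.length_pyRange_one]; omega
      have hb : (left % n + right - left + 1).toNat - (left % n).toNat
          = ((PySem.List.pyRange left (right + 1) 1).map (pvMaxf n)).length := by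
        rw [List.length_map, PySem.List.length_pyRange_one]; omega
      rw [PySem.List.slice_toNat, ha, List.drop_left, ← ha, hb, List.take_left]
      -- finally: cellA agrees with pvMaxf on every admitted index
      refine List.map_congr_left ?_
      intro i hi
      rw [PySem.List.mem_pyRange_one] at hi
      refine cellA_eq_max n i hn (by omega) ?_
      intro hmod
      unfold pvFirstBad at hr
      split_ifs at hr with hlsmall
      · by_contra hge
        push_neg at hge
        have hkey : n * (i / n) + i % n = i := Int.ediv_add_emod i n
        have hq : n - 1 < i / n := by
          by_contra hq'
          push_neg at hq'
          have : n * (i / n) ≤ n * (n - 1) :=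
            mul_le_mul_of_nonneg_left hq' (by omega)
          nlinarith
        have : n * n ≤ n * (i / n) :=
          mul_le_mul_of_nonneg_left (by omega) (by omega)
        omega
      · exfalso
        have hd0 : 0 ≤ (n - 1 - left) % n := Int.emod_nonneg _ (by omega)
        have hdn : (n - 1 - left) % n < n := Int.emod_lt_of_pos _ hpos
        have hne : (n - 1) % n = n - 1 := Int.emod_eq_of_lt (by omega) (by omega)
        have h1 : (i - left) % n = (n - 1 - left) % n := by
          rw [Int.sub_emod i left, Int.sub_emod (n - 1) left, hmod, hne]
        have h2 : (i - left) % n = i - left :=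
          Int.emod_eq_of_lt (by omega) (by omega)
        omega
      omega
      omega
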